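-- pv_equiv track=rewrite | github.com/WinstonPHz/Advent_of_code | 2020/Day_14/day_14.py | change_x
-- ===== SOURCE A (Python) =====
-- def change_x(masks, xs):
--     if len(xs) == 0:
--         return masks
--     x_loc = xs[0]
--     xs.pop(0)
--     new_masks = []
--     for j, mask in enumerate(masks):
--         new_masks.append(mask[0:x_loc]+"1"+mask[x_loc+1:])
--         new_masks.append(mask[0:x_loc]+"0"+mask[x_loc+1:])
--     return change_x(new_masks, xs)
-- ===== SOURCE B (Python) =====
-- # B: instead of recursively doubling the mask list per position, build all 0/1
-- # bit combinations once and apply each combination to each mask in a single pass.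
-- # Like A, it leaves xs emptied (A pops; B clears it at the end); equivalence is about the return value.
-- def change_x(masks, xs):
--     def combos(n):
--         if n == 0:
--             return [[]]
--         rest = combos(n - 1)
--         return [["1"] + c for c in rest] + [["0"] + c for c in rest]
--
--     cs = combos(len(xs))
--     out = []
--     for mask in masks:
--         for c in cs:
--             s = mask
--             for p, b in zip(xs, c):
--                 s = s[0:p] + b + s[p + 1:]
--             out.append(s)
--     del xs[:]
--     return out
-- ===== Notes on version B (the rewrite author's own statement) =====
-- stated objective: alternative
-- what changed: A recursively doubles the whole mask list once per X position; B enumerates all 0/1 bit combinations once and applies each combination to each mask in a single nested pass.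
import Mathlib
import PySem

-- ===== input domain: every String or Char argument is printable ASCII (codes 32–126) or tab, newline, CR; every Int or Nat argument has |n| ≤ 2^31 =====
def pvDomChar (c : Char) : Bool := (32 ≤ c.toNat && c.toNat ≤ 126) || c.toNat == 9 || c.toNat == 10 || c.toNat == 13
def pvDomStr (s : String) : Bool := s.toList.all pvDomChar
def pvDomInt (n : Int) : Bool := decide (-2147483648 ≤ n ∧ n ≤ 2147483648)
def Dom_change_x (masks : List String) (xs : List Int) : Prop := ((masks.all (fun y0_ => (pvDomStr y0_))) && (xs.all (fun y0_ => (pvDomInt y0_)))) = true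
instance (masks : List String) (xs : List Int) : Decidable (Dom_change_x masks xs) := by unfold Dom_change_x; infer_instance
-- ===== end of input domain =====

-- B builds all 0/1 bit combinations once and applies each to each mask in one pass,
-- instead of A's recursive doubling of the mask list; return values agree everywhere
-- (both Pythons also empty xs in place: A pops, B clears — equivalence here is about the return value).

-- ===== PORT A =====
-- mask[0:x_loc] + b + mask[x_loc+1:]  (Python string slicing, exact via PySem.Str.slice)
def pvRep (mask : String) (x_loc : Int) (b : String) : String :=
  PySem.Str.slice mask (some 0) (some x_loc) ++ b ++ PySem.Str.slice mask (some (x_loc + 1)) none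

def change_x (masks : List String) (xs : List Int) : List String :=
  match xs with
  | [] => masks
  | x_loc :: rest =>
      -- for j, mask in enumerate(masks): append the "1" then the "0" replacement
      let new_masks := masks.foldl (fun acc mask => acc ++ [pvRep mask x_loc "1", pvRep mask x_loc "0"]) []
      change_x new_masks rest

-- ===== PORT B =====
-- combos(n): all n-long lists of "1"/"0" bits, "1" branch first
def pvCombos : Nat → List (List String)
  | 0 => [[]]
  | n + 1 => (pvCombos n).map (fun c => "1" :: c) ++ (pvCombos n).map (fun c => "0" :: c)

-- s = mask; for p, b in zip(xs, c): s = s[0:p] + b + s[p+1:]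
def pvApply (s : String) (ps : List Int) (bits : List String) : String :=
  match ps, bits with
  | p :: ps', b :: bs => pvApply (pvRep s p b) ps' bs
  | _, _ => s

def change_x_alt (masks : List String) (xs : List Int) : List String :=
  masks.flatMap (fun mask => (pvCombos xs.length).map (fun c => pvApply mask xs c))

-- ===== PRECONDITION & SPEC =====
def Spec_change_x (masks : List String) (xs : List Int) (out : List String) : Prop := out = change_x_alt masks xs
instance (masks : List String) (xs : List Int) (out : List String) : Decidable (Spec_change_x masks xs out) := by unfold Spec_change_x; infer_instance

-- ===== CLAIM (what is proved, stated in full; the proofs are below) =====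
def Claim_equal_change_x : Prop := ∀ (masks : List String) (xs : List Int), Dom_change_x masks xs → Spec_change_x masks xs (change_x masks xs)

-- ===== LEMMAS AND PROOFS =====
theorem pvFoldl_pairs (masks : List String) (x : Int) (acc : List String) :
    masks.foldl (fun acc mask => acc ++ [pvRep mask x "1", pvRep mask x "0"]) acc
      = acc ++ masks.flatMap (fun mask => [pvRep mask x "1", pvRep mask x "0"]) := by
  induction masks generalizing acc with
  | nil => simp
  | cons m ms ih => simp [List.foldl, ih]

theorem change_x_eq_alt (masks : List String) (xs : List Int) :
    change_x masks xs = change_x_alt masks xs := by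
  induction xs generalizing masks with
  | nil => simp [change_x, change_x_alt, pvCombos, pvApply]
  | cons x rest ih =>
      rw [change_x]
      rw [pvFoldl_pairs, List.nil_append, ih]
      unfold change_x_alt
      rw [List.flatMap_assoc]
      simp only [List.length_cons, pvCombos, List.map_append, List.map_map]
      congr 1
      funext mask
      simp only [List.flatMap_cons, List.flatMap_nil, List.append_nil]
      congr 1

-- ===== VERDICT (by name: the statement is the Claim_ definition above) =====
theorem change_x_spec : Claim_equal_change_x := by
  intro masks xs _
  exact change_x_eq_alt masks xs
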